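-- pv_equiv track=rewrite | github.com/TE-WangShi/nnabla-nas | nnabla_nas/contrib/classification/ofa/modules.py | candidates2subnetlist
-- ===== SOURCE A (Python) =====
-- CANDIDATES = {
--     'XP3 3x3': {'ks': 3, 'expand_ratio': 3},
--     'XP3 5x5': {'ks': 5, 'expand_ratio': 3},
--     'XP3 7x7': {'ks': 7, 'expand_ratio': 3},
--     'XP4 3x3': {'ks': 3, 'expand_ratio': 4},
--     'XP4 5x5': {'ks': 5, 'expand_ratio': 4},
--     'XP4 7x7': {'ks': 7, 'expand_ratio': 4},
--     'XP6 3x3': {'ks': 3, 'expand_ratio': 6},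
--     'XP6 5x5': {'ks': 5, 'expand_ratio': 6},
--     'XP6 7x7': {'ks': 7, 'expand_ratio': 6},
--     'skip_connect': {'ks': None, 'expand_ratio': None},
-- }
--
-- def candidates2subnetlist(candidates):
--     ks_list = []
--     expand_list = []
--     for candidate in candidates:
--         ks = CANDIDATES[candidate]['ks']
--         e = CANDIDATES[candidate]['expand_ratio']
--         if ks not in ks_list:
--             ks_list.append(ks)
--         if e not in expand_list:
--             expand_list.append(e)
--     return ks_list, expand_list
-- ===== SOURCE B (Python) =====
-- CANDIDATES = {
--     'XP3 3x3': {'ks': 3, 'expand_ratio': 3},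
--     'XP3 5x5': {'ks': 5, 'expand_ratio': 3},
--     'XP3 7x7': {'ks': 7, 'expand_ratio': 3},
--     'XP4 3x3': {'ks': 3, 'expand_ratio': 4},
--     'XP4 5x5': {'ks': 5, 'expand_ratio': 4},
--     'XP4 7x7': {'ks': 7, 'expand_ratio': 4},
--     'XP6 3x3': {'ks': 3, 'expand_ratio': 6},
--     'XP6 5x5': {'ks': 5, 'expand_ratio': 6},
--     'XP6 7x7': {'ks': 7, 'expand_ratio': 6},
--     'skip_connect': {'ks': None, 'expand_ratio': None},
-- }
--
--
-- def _dedup(vals):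
--     # keep the first element, strip all its later copies, recurse on the rest
--     if not vals:
--         return []
--     head = vals[0]
--     return [head] + _dedup([v for v in vals[1:] if v != head])
--
--
-- def candidates2subnetlist(candidates):
--     ks_list = _dedup([CANDIDATES[c]['ks'] for c in candidates])
--     expand_list = _dedup([CANDIDATES[c]['expand_ratio'] for c in candidates])
--     return ks_list, expand_list
-- ===== Notes on version B (the rewrite author's own statement) =====
-- stated objective: alternative
-- what changed: Instead of one interleaved loop growing two accumulators with membership scans, B projects each attribute into a list and deduplicates it by a recursive head-and-filter scheme: keep the head, delete all its later copies from the tail, recurse on what remains (no accumulator, no membership test).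
import Mathlib
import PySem

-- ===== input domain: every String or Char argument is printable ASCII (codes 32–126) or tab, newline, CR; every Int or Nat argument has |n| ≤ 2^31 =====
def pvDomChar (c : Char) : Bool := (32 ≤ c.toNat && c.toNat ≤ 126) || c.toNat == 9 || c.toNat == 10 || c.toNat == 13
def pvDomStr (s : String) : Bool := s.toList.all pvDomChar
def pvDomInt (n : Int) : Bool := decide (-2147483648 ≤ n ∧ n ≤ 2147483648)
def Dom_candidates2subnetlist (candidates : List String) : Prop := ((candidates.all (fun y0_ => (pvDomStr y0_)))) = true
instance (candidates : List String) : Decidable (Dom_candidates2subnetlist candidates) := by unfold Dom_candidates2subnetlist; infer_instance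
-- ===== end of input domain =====

-- B replaces the interleaved accumulator loop by two projected lists each deduplicated
-- with a recursive head-and-filter scheme (keep head, drop its later copies, recurse).

-- Shared module constant: CANDIDATES[c] as (ks, expand_ratio); none models the missing key (excluded by Pre_).
def candInfo (c : String) : Option (Option Int × Option Int) :=
  if c = "XP3 3x3" then some (some 3, some 3)
  else if c = "XP3 5x5" then some (some 5, some 3)
  else if c = "XP3 7x7" then some (some 7, some 3)
  else if c = "XP4 3x3" then some (some 3, some 4)
  else if c = "XP4 5x5" then some (some 5, some 4)
  else if c = "XP4 7x7" then some (some 7, some 4)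
  else if c = "XP6 3x3" then some (some 3, some 6)
  else if c = "XP6 5x5" then some (some 5, some 6)
  else if c = "XP6 7x7" then some (some 7, some 6)
  else if c = "skip_connect" then some (none, none)
  else none

-- ===== PORT A =====
def candidates2subnetlist (candidates : List String) : List (Option Int) × List (Option Int) :=
  candidates.foldl
    (fun st candidate =>
      let p := (candInfo candidate).getD (none, none)
      let ks_list := if p.1 ∈ st.1 then st.1 else st.1 ++ [p.1]
      let expand_list := if p.2 ∈ st.2 then st.2 else st.2 ++ [p.2]
      (ks_list, expand_list))
    ([], [])

-- ===== PORT B =====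
-- recursive head-and-filter dedup, the transliteration of Source B's _dedup
def dedupF {α : Type} [DecidableEq α] : List α → List α
  | [] => []
  | x :: t => x :: dedupF (t.filter (fun v => v ≠ x))
termination_by xs => xs.length
decreasing_by
  simp only [List.length_unattach, List.length_cons]
  exact Nat.lt_succ_of_le (le_trans (List.length_filter_le _ _) (Nat.le_of_eq List.length_attach))

def candidates2subnetlist_alt (candidates : List String) : List (Option Int) × List (Option Int) :=
  (dedupF (candidates.map (fun c => ((candInfo c).getD (none, none)).1)),
   dedupF (candidates.map (fun c => ((candInfo c).getD (none, none)).2)))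

-- ===== PRECONDITION & SPEC =====
-- Pre_ excludes candidate names not in CANDIDATES, on which Python A raises KeyError.
def Pre_candidates2subnetlist (candidates : List String) : Prop :=
  ∀ c ∈ candidates, (candInfo c).isSome
instance (candidates : List String) : Decidable (Pre_candidates2subnetlist candidates) := by unfold Pre_candidates2subnetlist; infer_instance

def pvWitness_candidates2subnetlist : List String := ["XP3 5x5", "skip_connect", "XP4 5x5"]

def Spec_candidates2subnetlist (candidates : List String) (out : List (Option Int) × List (Option Int)) : Prop := out = candidates2subnetlist_alt candidates
instance (candidates : List String) (out : List (Option Int) × List (Option Int)) : Decidable (Spec_candidates2subnetlist candidates out) := by unfold Spec_candidates2subnetlist; infer_instance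

-- ===== CLAIM (what is proved, stated in full; the proofs are below) =====
def Claim_equal_candidates2subnetlist : Prop := ∀ (candidates : List String), Dom_candidates2subnetlist candidates → Pre_candidates2subnetlist candidates → Spec_candidates2subnetlist candidates (candidates2subnetlist candidates)

-- ===== LEMMAS AND PROOFS =====

-- Equation lemmas for the well-founded dedupF.
theorem dedupF_nil {α : Type} [DecidableEq α] : dedupF ([] : List α) = [] := by
  rw [dedupF.eq_def]
theorem dedupF_cons {α : Type} [DecidableEq α] (x : α) (t : List α) :
    dedupF (x :: t) = x :: dedupF (t.filter (fun v => v ≠ x)) := by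
  rw [dedupF.eq_def]

-- A's membership-append step, isolated.
def insStep (acc : List (Option Int)) (x : Option Int) : List (Option Int) :=
  if x ∈ acc then acc else acc ++ [x]

-- The interleaved fold splits into two independent insStep folds over the projected lists.
theorem foldl_pair_split (cs : List String) (a b : List (Option Int)) :
    cs.foldl
      (fun st candidate =>
        let p := (candInfo candidate).getD (none, none)
        let ks_list := if p.1 ∈ st.1 then st.1 else st.1 ++ [p.1]
        let expand_list := if p.2 ∈ st.2 then st.2 else st.2 ++ [p.2]
        (ks_list, expand_list))
      (a, b)
    = ((cs.map (fun c => ((candInfo c).getD (none, none)).1)).foldl insStep a,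
       (cs.map (fun c => ((candInfo c).getD (none, none)).2)).foldl insStep b) := by
  induction cs generalizing a b with
  | nil => rfl
  | cons c t ih =>
      simp only [List.foldl_cons, List.map_cons, ih, insStep]

-- Accumulator invariant: folding insStep appends exactly the head-and-filter dedup of the unseen part.
theorem foldl_insStep_eq (xs : List (Option Int)) (a : List (Option Int)) :
    xs.foldl insStep a = a ++ dedupF (xs.filter (fun v => v ∉ a)) := by
  induction xs generalizing a with
  | nil => simp [dedupF_nil]
  | cons x t ih =>
      by_cases hx : x ∈ a
      · simp [List.foldl_cons, insStep, hx, ih]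
      · simp only [List.foldl_cons, insStep, ih, List.filter_cons]
        simp only [hx, if_false, not_false_iff, decide_true, if_true]
        rw [dedupF_cons, List.filter_filter, List.append_assoc, List.singleton_append]
        congr 2
        congr 1
        apply List.filter_congr
        intro v _
        by_cases h1 : v = x <;> by_cases h2 : v ∈ a <;> simp [h1, h2]

-- ===== VERDICT (by name: the statement is the Claim_ definition above) =====
theorem candidates2subnetlist_spec : Claim_equal_candidates2subnetlist := by
  intro candidates _ _
  show _ = _
  rw [candidates2subnetlist, foldl_pair_split]
  simp [candidates2subnetlist_alt, foldl_insStep_eq]
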